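-- pv_equiv track=rewrite | github.com/249373/Kodowanie | main.py | slideA
-- ===== SOURCE A (Python) =====
-- def slideA(a):
--     lenght = len(a)
--     a.append(0)
--     a.append(0)
--     for i in range(lenght):  # przesuwamy wielomian informacyjny
--         a.append(a[i])
--         a[i] = 0
--     return a
-- ===== SOURCE B (Python) =====
-- def slideA(a):
--     n = len(a)
--     a[:] = [0] * (n + 2) + a
--     return a
-- ===== Notes on version B (the rewrite author's own statement) =====
-- stated objective: simpler
-- what changed: Replaces the element-wise append-and-zero loop by a single closed-form concatenation of n+2 zeros with the original list, slice-assigned back in place.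
import Mathlib
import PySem

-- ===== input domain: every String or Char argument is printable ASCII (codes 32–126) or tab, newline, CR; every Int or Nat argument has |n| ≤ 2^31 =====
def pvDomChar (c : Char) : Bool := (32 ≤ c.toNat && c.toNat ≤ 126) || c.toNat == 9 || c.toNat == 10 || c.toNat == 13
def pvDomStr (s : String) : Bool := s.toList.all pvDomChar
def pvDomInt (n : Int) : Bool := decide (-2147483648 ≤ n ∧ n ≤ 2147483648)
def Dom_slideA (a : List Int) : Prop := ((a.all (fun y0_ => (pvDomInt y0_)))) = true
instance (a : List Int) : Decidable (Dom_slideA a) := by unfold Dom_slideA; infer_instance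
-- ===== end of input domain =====

-- B replaces A's element-wise append-and-zero loop by the closed form [0]*(n+2) + a (simpler);
-- both mutate the argument list in place and return it — the equivalence proved is about the return value.

-- ===== PORT A =====
-- literal transliteration: the list state starts as a ++ [0,0]; each loop step appends a[i] and sets a[i] := 0
def slideA (a : List Int) : List Int :=
  (PySem.List.pyRange 0 a.length 1).foldl
    (fun xs i => PySem.List.pySetD (xs ++ [PySem.List.pyGetD xs i 0]) i 0)
    (a ++ [0, 0])

-- ===== PORT B =====
def slideA_alt (a : List Int) : List Int :=
  List.replicate (a.length + 2) 0 ++ a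

-- ===== PRECONDITION & SPEC =====
def Spec_slideA (a : List Int) (out : List Int) : Prop := out = slideA_alt a
instance (a : List Int) (out : List Int) : Decidable (Spec_slideA a out) := by unfold Spec_slideA; infer_instance

-- ===== CLAIM (what is proved, stated in full; the proofs are below) =====
def Claim_equal_slideA : Prop := ∀ (a : List Int), Dom_slideA a → Spec_slideA a (slideA a)

-- ===== LEMMAS AND PROOFS =====

-- loop invariant: after the first k iterations the state is k zeros, the untouched tail, the two
-- appended zeros, and the first k original elements copied to the back
theorem slideA_loop_inv (a : List Int) (k : Nat) (hk : k ≤ a.length) :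
    (List.range k).foldl
      (fun xs (i : Nat) => PySem.List.pySetD (xs ++ [PySem.List.pyGetD xs (i : Int) 0]) (i : Int) 0)
      (a ++ [0, 0])
    = List.replicate k 0 ++ a.drop k ++ [0, 0] ++ a.take k := by
  induction k with
  | zero => simp
  | succ k ih =>
    have hk' : k ≤ a.length := Nat.le_of_succ_le hk
    have hklt : k < a.length := hk
    rw [List.range_succ, List.foldl_append, ih hk']
    have hdrop : a.drop k = a[k] :: a.drop (k + 1) := (List.drop_eq_getElem_cons hklt)
    have hget : PySem.List.pyGetD
        (List.replicate k 0 ++ a.drop k ++ [0, 0] ++ a.take k) (k : Int) 0 = a[k] := by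
      rw [PySem.List.pyGetD_natCast, List.append_assoc, List.append_assoc,
        List.getD_append_right _ _ _ _ (by simp)]
      rw [hdrop]
      simp [-List.getElem_cons_drop]
    simp only [List.foldl_cons, List.foldl_nil, hget, PySem.List.pySetD_natCast]
    rw [List.append_assoc, List.append_assoc, List.append_assoc,
      List.set_append_right _ _ (by simp)]
    rw [List.take_add_one, List.getElem?_eq_getElem hklt, hdrop]
    simp [List.replicate_succ', -List.getElem_cons_drop]

-- ===== VERDICT (by name: the statement is the Claim_ definition above) =====
theorem slideA_spec : Claim_equal_slideA := by
  intro a _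
  show slideA a = slideA_alt a
  unfold slideA slideA_alt
  rw [PySem.List.pyRange_zero_nat]
  rw [List.foldl_map]
  rw [slideA_loop_inv a a.length le_rfl]
  simp [List.replicate_add]
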